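-- pv_equiv track=rewrite | github.com/rnjsdn12332/Coding_study | Programmgers_행렬과 연산.py | solution
-- ===== SOURCE A (Python) =====
-- from collections import deque
--
-- def solution(rc, operations):
--     answer = [[]]
--     q=deque(rc)
--     r_len=len(rc)
--     c_len=len(rc[0])
--     rows = deque(deque(row[1:-1]) for row in rc)
--
--     out_cols = [deque(rc[r][0] for r in range(r_len)),
--                 deque(rc[r][c_len - 1] for r in range(r_len))]
--     def shift() :
--         rows.appendleft(rows.pop())
--         out_cols[0].appendleft(out_cols[0].pop())
--         out_cols[1].appendleft(out_cols[1].pop())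
--
--     def rotation() :
--         #왼쪽 첫 열 이동
--         rows[0].appendleft(out_cols[0].popleft())
--         #위 첫 행에서 오른족 열로 이동
--         out_cols[1].appendleft(rows[0].pop())
--         #왼쪽 열에서 아래 맨 뒤 행 이동
--         rows[r_len-1].append(out_cols[1].pop())
--         #맨 아래 행에서 왼쪽 열로 이동
--         out_cols[0].append(rows[r_len-1].popleft())
--
--
--     for oper in operations :
--         if "S" in oper :
--             shift()
--         else :
--             rotation()
--     answer=[]
--     for r in range(r_len) :
--         temp=[]
--         temp.append(out_cols[0][r])
--         temp.extend(rows[r])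
--         temp.append(out_cols[1][r])
--         answer.append(temp)
--     return answer
-- ===== SOURCE B (Python) =====
-- def solution(rc, operations):
--     grid = [list(row) for row in rc]
--     for op in operations:
--         if "S" in op:
--             grid = [grid[-1]] + grid[:-1]
--         else:
--             R, C = len(grid), len(grid[0])
--             new = []
--             for i in range(R):
--                 if i == 0:
--                     new.append([grid[1][0]] + grid[0][:-1])
--                 elif i == R - 1:
--                     new.append(grid[R - 1][1:] + [grid[R - 2][C - 1]])
--                 else:
--                     new.append([grid[i + 1][0]] + grid[i][1:-1] + [grid[i - 1][C - 1]])
--             grid = new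
--     return grid
-- ===== Notes on version B (the rewrite author's own statement) =====
-- stated objective: simpler
-- what changed: B keeps the whole grid as one list of rows and applies each operation functionally -- ShiftRow moves the last row to the front, Rotate rebuilds every row from a direct index mapping of the clockwise border rotation -- instead of A's decomposition into interior-row deques plus two boundary-column deques with four corner hand-offs.
-- outside the precondition, e.g. on solution([[1, 2, 3]], ['Rotate']): A returns [[1, 3, 2]], B raises IndexError; on solution([[1], [2]], ['Rotate']): A returns [[2, 1], [2, 1]], B returns [[2], [1]]; on solution([[1, 2], [3, 4, 5]], ['ShiftRow']): A returns [[3, 4, 4], [1, 2]], B returns [[3, 4, 5], [1, 2]]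
import Mathlib
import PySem

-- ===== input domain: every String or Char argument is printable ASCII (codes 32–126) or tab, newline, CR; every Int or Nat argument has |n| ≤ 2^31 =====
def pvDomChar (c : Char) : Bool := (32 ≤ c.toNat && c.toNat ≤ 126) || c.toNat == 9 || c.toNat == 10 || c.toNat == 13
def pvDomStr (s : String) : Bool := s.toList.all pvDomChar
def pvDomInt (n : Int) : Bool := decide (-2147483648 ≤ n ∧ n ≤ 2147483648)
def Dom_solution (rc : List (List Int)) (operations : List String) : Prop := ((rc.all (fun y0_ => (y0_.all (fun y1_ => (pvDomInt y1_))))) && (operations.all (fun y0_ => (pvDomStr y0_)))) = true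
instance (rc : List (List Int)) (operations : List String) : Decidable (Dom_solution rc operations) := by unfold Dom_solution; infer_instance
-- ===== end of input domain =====

-- B keeps the grid as one list of rows and applies each operation functionally (Rotate = direct
-- index mapping of the clockwise border rotation) instead of A's interior-rows + two boundary-column
-- deques; objective: simpler (not faster).

-- ===== PORT A =====
-- state of A's loop: (out_cols[0], rows, out_cols[1]); deques are Lists, appendleft = cons,
-- pop = getLast + dropLast, popleft = head + tail.  Indexing/pop use defaults (getD/headD/getLastD)
-- only where Pre_solution guarantees the Python deque operation succeeds.
def solutionShift (st : List Int × List (List Int) × List Int) :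
    List Int × List (List Int) × List Int :=
  (st.1.getLastD 0 :: st.1.dropLast,
   st.2.1.getLastD [] :: st.2.1.dropLast,
   st.2.2.getLastD 0 :: st.2.2.dropLast)

def solutionRot (rl : Nat) (st : List Int × List (List Int) × List Int) :
    List Int × List (List Int) × List Int :=
  let c0 := st.1; let rows := st.2.1; let c1 := st.2.2
  -- rows[0].appendleft(out_cols[0].popleft())
  let rows := rows.set 0 (c0.headD 0 :: rows.getD 0 []); let c0 := c0.tail
  -- out_cols[1].appendleft(rows[0].pop())
  let c1 := (rows.getD 0 []).getLastD 0 :: c1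
  let rows := rows.set 0 ((rows.getD 0 []).dropLast)
  -- rows[r_len-1].append(out_cols[1].pop())
  let rows := rows.set (rl - 1) ((rows.getD (rl - 1) []) ++ [c1.getLastD 0])
  let c1 := c1.dropLast
  -- out_cols[0].append(rows[r_len-1].popleft())
  let c0 := c0 ++ [(rows.getD (rl - 1) []).headD 0]
  let rows := rows.set (rl - 1) ((rows.getD (rl - 1) []).tail)
  (c0, rows, c1)

def solution (rc : List (List Int)) (operations : List String) : List (List Int) :=
  let rl := rc.length
  let cl := (rc.headD []).length                 -- len(rc[0]); rc = [] raises, excluded by Pre_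
  let rows := rc.map (fun row => PySem.List.slice row (some 1) (some (-1)))   -- row[1:-1]
  let c0 := (List.range rl).map (fun r => (rc.getD r []).getD 0 0)            -- rc[r][0]
  let c1 := (List.range rl).map (fun r => (rc.getD r []).getD (cl - 1) 0)    -- rc[r][c_len-1]
  let st := operations.foldl
    (fun st oper => if PySem.Str.isIn "S" oper then solutionShift st else solutionRot rl st)
    (c0, rows, c1)
  (List.range rl).map (fun r => st.1.getD r 0 :: st.2.1.getD r [] ++ [st.2.2.getD r 0])

-- ===== PORT B =====
-- one Rotate step: rebuild every row from the clockwise border index mapping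
def solutionAltRot (g : List (List Int)) : List (List Int) :=
  let rl := g.length
  let cl := (g.headD []).length
  (List.range rl).map (fun i =>
    if i = 0 then
      (g.getD 1 []).getD 0 0 :: PySem.List.slice (g.getD 0 []) none (some (-1))
    else if i = rl - 1 then
      PySem.List.slice (g.getD (rl - 1) []) (some 1) none ++ [(g.getD (rl - 2) []).getD (cl - 1) 0]
    else
      (g.getD (i + 1) []).getD 0 0 ::
        PySem.List.slice (g.getD i []) (some 1) (some (-1)) ++ [(g.getD (i - 1) []).getD (cl - 1) 0])

def solution_alt (rc : List (List Int)) (operations : List String) : List (List Int) :=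
  operations.foldl
    (fun g op =>
      if PySem.Str.isIn "S" op then PySem.List.pyGetD g (-1) [] :: PySem.List.slice g none (some (-1))
      else solutionAltRot g)
    rc

-- ===== PRECONDITION & SPEC =====
-- Pre_ restricts to the natural domain of the original Programmers problem: a rectangular matrix
-- with at least 2 rows and 2 columns.  Outside it A either raises (empty matrix, a row shorter than
-- row 0) or returns shape-mangled values (a 1-column matrix yields rows of width 2, a 1-row matrix
-- rotates by an accidental element mapping); B does the natural thing there.
def Pre_solution (rc : List (List Int)) (operations : List String) : Prop :=
  2 ≤ rc.length ∧ 2 ≤ (rc.headD []).length ∧ ∀ row ∈ rc, row.length = (rc.headD []).length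
instance (rc : List (List Int)) (operations : List String) : Decidable (Pre_solution rc operations) := by
  unfold Pre_solution; infer_instance

def pvWitness_solution : List (List Int) × List String :=
  ([[1, 2], [3, 4]], ["ShiftRow", "Rotate"])

def Spec_solution (rc : List (List Int)) (operations : List String) (out : List (List Int)) : Prop := out = solution_alt rc operations
instance (rc : List (List Int)) (operations : List String) (out : List (List Int)) : Decidable (Spec_solution rc operations out) := by unfold Spec_solution; infer_instance

-- ===== CLAIM (what is proved, stated in full; the proofs are below) =====
def Claim_equal_solution : Prop := ∀ (rc : List (List Int)) (operations : List String), Dom_solution rc operations → Pre_solution rc operations → Spec_solution rc operations (solution rc operations)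

-- ===== LEMMAS AND PROOFS =====


-- getD-level list ext and indexing helpers specific to this proof's getD-based reasoning
lemma pvExtD {α : Type} (d : α) (xs ys : List α) (hl : xs.length = ys.length)
    (h : ∀ i, i < xs.length → xs.getD i d = ys.getD i d) : xs = ys := by
  apply List.ext_getElem hl
  intro i h1 h2
  rw [← List.getD_eq_getElem xs d h1, ← List.getD_eq_getElem ys d h2]
  exact h i h1

lemma pvGetLastD {α : Type} (x : List α) (d : α) (h : 0 < x.length) :
    x.getLastD d = x.getD (x.length - 1) d := by
  cases x with
  | nil => simp at h
  | cons a l =>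
    rw [List.getLastD_eq_getLast?, List.getLast?_eq_getElem?]
    simp [List.getD]

lemma pvDropLastD {α : Type} (x : List α) (d : α) (j : Nat) (h : j + 1 < x.length) :
    x.dropLast.getD j d = x.getD j d := by
  rw [List.getD_eq_getElem _ _ (by simp; omega), List.getD_eq_getElem _ _ (by omega),
    List.getElem_dropLast]

lemma pvTailD {α : Type} (x : List α) (d : α) (j : Nat) : x.tail.getD j d = x.getD (j + 1) d := by
  cases x <;> simp [List.getD]

lemma pvConsD {α : Type} (a d : α) (l : List α) (i : Nat) (h : 0 < i) :
    (a :: l).getD i d = l.getD (i - 1) d := by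
  cases i with
  | zero => omega
  | succ n => simp

lemma pvAppendD_lt {α : Type} (x : List α) (a d : α) (j : Nat) (h : j < x.length) :
    (x ++ [a]).getD j d = x.getD j d := by
  rw [List.getD_eq_getElem _ _ (by simp; omega), List.getD_eq_getElem _ _ h,
    List.getElem_append_left]

lemma pvAppendD_self {α : Type} (x : List α) (a d : α) : (x ++ [a]).getD x.length d = a := by
  rw [List.getD_eq_getElem _ _ (by simp)]; simp

lemma pvSetD_ne {α : Type} (x : List α) (i j : Nat) (a d : α) (h : i ≠ j) :
    (x.set i a).getD j d = x.getD j d := by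
  simp [List.getD, List.getElem?_set_ne h]

lemma pvSetD_self {α : Type} (x : List α) (i : Nat) (a d : α) (h : i < x.length) :
    (x.set i a).getD i d = a := by
  rw [List.getD_eq_getElem _ _ (by simpa using h)]; simp

lemma pvHeadD {α : Type} (x : List α) (d : α) : x.headD d = x.getD 0 d := by
  cases x <;> simp

lemma pvHeadD_cons_tail {α : Type} (x : List α) (d : α) (h : x ≠ []) :
    x.headD d :: x.tail = x := by
  cases x with
  | nil => exact absurd rfl h
  | cons a l => rfl

lemma pvGetD_mem {α : Type} (x : List α) (d : α) (i : Nat) (h : i < x.length) :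
    x.getD i d ∈ x := by
  rw [List.getD_eq_getElem _ _ h]; exact List.getElem_mem h

lemma pvDropLast_lastD {α : Type} (x : List α) (d : α) (h : x ≠ []) :
    x.dropLast ++ [x.getLastD d] = x := by
  rw [List.getLastD_eq_getLast?, List.getLast?_eq_some_getLast h]
  exact List.dropLast_append_getLast h

-- invariant of A's loop state: column lengths R, R interior rows of width C-2
def pvInv (R C : Nat) (st : List Int × List (List Int) × List Int) : Prop :=
  st.1.length = R ∧ st.2.1.length = R ∧ st.2.2.length = R ∧
    ∀ l ∈ st.2.1, l.length = C - 2

-- reassembly of A's state into the full grid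
def pvGlue (R : Nat) (st : List Int × List (List Int) × List Int) : List (List Int) :=
  (List.range R).map (fun r => st.1.getD r 0 :: st.2.1.getD r [] ++ [st.2.2.getD r 0])

lemma pvSlice_one_neg_one {α : Type} (xs : List α) :
    PySem.List.slice xs (some 1) (some (-1)) = xs.tail.dropLast := by
  cases xs with
  | nil => rfl
  | cons a l =>
    simp [PySem.List.slice, PySem.List.clampIdx, List.dropLast_eq_take]
    split_ifs <;> simp_all <;> omega

lemma pvGlue_length (R : Nat) (st : List Int × List (List Int) × List Int) :
    (pvGlue R st).length = R := by simp [pvGlue]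

lemma pvGlue_getD (R : Nat) (st : List Int × List (List Int) × List Int) (k : Nat) (hk : k < R) :
    (pvGlue R st).getD k [] = st.1.getD k 0 :: st.2.1.getD k [] ++ [st.2.2.getD k 0] :=
  PySem.List.getD_map_range _ _ _ _ hk

lemma pvShift_inv (R C : Nat) (st : List Int × List (List Int) × List Int)
    (h : pvInv R C st) (hR : 1 ≤ R) : pvInv R C (solutionShift st) := by
  obtain ⟨c0, rows, c1⟩ := st
  obtain ⟨h1, h2, h3, h4⟩ := h
  refine ⟨?_, ?_, ?_, ?_⟩
  · simp only [solutionShift]; simp at h1 ⊢; omega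
  · simp only [solutionShift]; simp at h2 ⊢; omega
  · simp only [solutionShift]; simp at h3 ⊢; omega
  · intro l hl
    simp only [solutionShift] at hl
    simp at h2 h4
    rcases List.mem_cons.mp hl with he | hm
    · subst he
      rw [pvGetLastD rows ([] : List Int) (by omega)]
      exact h4 _ (pvGetD_mem rows [] (rows.length - 1) (by omega))
    · exact h4 _ (List.dropLast_subset _ hm)

lemma pvShift_glue (R C : Nat) (st : List Int × List (List Int) × List Int)
    (h : pvInv R C st) (hR : 1 ≤ R) :
    PySem.List.pyGetD (pvGlue R st) (-1) [] :: PySem.List.slice (pvGlue R st) none (some (-1))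
      = pvGlue R (solutionShift st) := by
  obtain ⟨c0, rows, c1⟩ := st
  obtain ⟨h1, h2, h3, _⟩ := h
  simp only at h1 h2 h3
  have hgl : (pvGlue R (c0, rows, c1)).length = R := pvGlue_length R _
  have hg : pvGlue R (c0, rows, c1) ≠ [] := by
    intro e; rw [e] at hgl; simp at hgl; omega
  rw [PySem.List.slice_to_neg_one, PySem.List.pyGetD_neg_one _ _ hg]
  have hlast : (pvGlue R (c0, rows, c1)).getLast hg = (pvGlue R (c0, rows, c1)).getD (R - 1) [] := by
    rw [List.getD_eq_getElem _ _ (by omega), List.getLast_eq_getElem]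
    congr 1
    omega
  rw [hlast]
  apply pvExtD ([] : List Int)
  · rw [List.length_cons, List.length_dropLast, hgl, pvGlue_length]
    omega
  · intro i hi
    simp only [List.length_cons, List.length_dropLast, hgl] at hi
    have hiR : i < R := by omega
    rcases Nat.eq_zero_or_pos i with h0 | hpos
    · subst h0
      simp only [List.getD_cons_zero]
      rw [pvGlue_getD R _ (R - 1) (by omega), pvGlue_getD R _ 0 (by omega)]
      simp only [solutionShift]
      rw [List.getD_cons_zero, List.getD_cons_zero, List.getD_cons_zero,
        pvGetLastD c0 0 (by omega), pvGetLastD rows [] (by omega), pvGetLastD c1 0 (by omega),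
        h1, h2, h3]
    · rw [pvConsD _ _ _ i hpos, pvDropLastD _ _ _ (by rw [hgl]; omega),
        pvGlue_getD R _ (i - 1) (by omega), pvGlue_getD R _ i hiR]
      simp only [solutionShift]
      rw [pvConsD _ _ _ i hpos, pvConsD _ _ _ i hpos, pvConsD _ _ _ i hpos,
        pvDropLastD c0 _ _ (by omega), pvDropLastD rows _ _ (by omega),
        pvDropLastD c1 _ _ (by omega)]

lemma pvGetLastD_cons {α : Type} (a d : α) (l : List α) (h : l ≠ []) :
    (a :: l).getLastD d = l.getLastD d := by
  cases l with
  | nil => exact absurd rfl h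
  | cons b m => rfl

lemma pvDropLast_cons {α : Type} (a : α) (l : List α) (h : l ≠ []) :
    (a :: l).dropLast = a :: l.dropLast := by
  cases l with
  | nil => exact absurd rfl h
  | cons b m => rfl

lemma pvRowZero {α : Type} (a b d : α) (l : List α) : ((a :: l) ++ [b]).getD 0 d = a := by
  rw [List.cons_append]; rfl

lemma pvRowTail {α : Type} (a b : α) (l : List α) : ((a :: l) ++ [b]).tail = l ++ [b] := by
  rw [List.cons_append, List.tail_cons]

lemma pvRowLastD {α : Type} (a b d : α) (l : List α) (C : Nat) (hC : 2 ≤ C)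
    (hl : l.length = C - 2) : ((a :: l) ++ [b]).getD (C - 1) d = b := by
  rw [List.cons_append, pvConsD _ _ _ (C - 1) (by omega)]
  have : C - 1 - 1 = l.length := by omega
  rw [this, pvAppendD_self]

lemma pvRot_closed (R : Nat) (c0 : List Int) (rows : List (List Int)) (c1 : List Int)
    (h1 : c0.length = R) (h2 : rows.length = R) (h3 : c1.length = R) (hR : 2 ≤ R) :
    solutionRot R (c0, rows, c1) =
      (c0.tail ++ [((rows.getD (R - 1) []) ++ [c1.getLastD 0]).headD 0],
       (rows.set 0 ((c0.headD 0 :: rows.getD 0 []).dropLast)).set (R - 1)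
         (((rows.getD (R - 1) []) ++ [c1.getLastD 0]).tail),
       (c0.headD 0 :: rows.getD 0 []).getLastD 0 :: c1.dropLast) := by
  have hc1 : c1 ≠ [] := by intro e; rw [e] at h3; simp at h3; omega
  simp only [solutionRot]
  rw [pvSetD_self rows 0 _ [] (by omega)]
  rw [List.set_set]
  rw [pvSetD_ne _ 0 (R - 1) _ [] (by omega)]
  rw [pvGetLastD_cons _ 0 c1 hc1]
  rw [pvSetD_self _ (R - 1) _ [] (by simp; omega)]
  rw [List.set_set]
  rw [pvDropLast_cons _ c1 hc1]

lemma pvRot_inv (R C : Nat) (st : List Int × List (List Int) × List Int)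
    (h : pvInv R C st) (hR : 2 ≤ R) (hC : 2 ≤ C) : pvInv R C (solutionRot R st) := by
  obtain ⟨c0, rows, c1⟩ := st
  obtain ⟨h1, h2, h3, h4⟩ := h
  simp only at h1 h2 h3 h4
  rw [pvRot_closed R c0 rows c1 h1 h2 h3 hR]
  have hw0 : (rows.getD 0 []).length = C - 2 := h4 _ (pvGetD_mem rows [] 0 (by omega))
  have hwL : (rows.getD (R - 1) []).length = C - 2 := h4 _ (pvGetD_mem rows [] (R - 1) (by omega))
  refine ⟨?_, ?_, ?_, ?_⟩
  · simp [h1]; omega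
  · simp [h2]
  · simp [h3]; omega
  · intro l hl
    simp only at hl
    rcases List.mem_or_eq_of_mem_set hl with hl2 | he
    · rcases List.mem_or_eq_of_mem_set hl2 with hl3 | he2
      · exact h4 _ hl3
      · rw [he2]; simp only [List.length_dropLast, List.length_cons, hw0]; omega
    · rw [he]
      simp only [List.length_tail, List.length_append, List.length_singleton, hwL]
      omega

lemma pvRot_glue (R C : Nat) (st : List Int × List (List Int) × List Int)
    (h : pvInv R C st) (hR : 2 ≤ R) (hC : 2 ≤ C) :
    solutionAltRot (pvGlue R st) = pvGlue R (solutionRot R st) := by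
  obtain ⟨c0, rows, c1⟩ := st
  obtain ⟨h1, h2, h3, h4⟩ := h
  simp only at h1 h2 h3 h4
  have hwidth : ∀ k, k < R → (rows.getD k []).length = C - 2 := fun k hk =>
    h4 _ (pvGetD_mem rows [] k (by omega))
  have hgrow : ∀ k, k < R → (pvGlue R (c0, rows, c1)).getD k [] =
      c0.getD k 0 :: rows.getD k [] ++ [c1.getD k 0] := fun k hk => pvGlue_getD R _ k hk
  have hgl : (pvGlue R (c0, rows, c1)).length = R := pvGlue_length R _
  have hhd : ((pvGlue R (c0, rows, c1)).headD []).length = C := by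
    rw [pvHeadD _ [], hgrow 0 (by omega)]
    simp only [List.length_cons, List.length_append, List.length_nil, hwidth 0 (by omega)]
    omega
  rw [pvRot_closed R c0 rows c1 h1 h2 h3 hR]
  simp only [solutionAltRot]
  rw [hgl, hhd]
  apply pvExtD ([] : List Int)
  · rw [List.length_map, List.length_range, pvGlue_length]
  · intro i hi
    simp only [List.length_map, List.length_range] at hi
    rw [PySem.List.getD_map_range _ _ _ _ hi]
    conv_rhs => rw [pvGlue_getD R _ i hi]
    by_cases h0 : i = 0
    · subst h0
      rw [if_pos rfl]
      rw [PySem.List.slice_to_neg_one, hgrow 1 (by omega), hgrow 0 (by omega)]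
      rw [pvRowZero, List.dropLast_concat]
      -- RHS components
      rw [pvAppendD_lt _ _ _ 0 (by simp [h1]; omega), pvTailD,
        pvSetD_ne _ (R - 1) 0 _ [] (by omega), pvSetD_self _ 0 _ [] (by omega),
        List.getD_cons_zero]
      rw [List.cons_append, pvDropLast_lastD _ _ (by simp), pvHeadD c0 0]
    · by_cases hL : i = R - 1
      · subst hL
        rw [if_neg h0, if_pos rfl]
        rw [PySem.List.slice_from_one, hgrow (R - 1) (by omega), hgrow (R - 2) (by omega)]
        rw [pvRowTail, pvRowLastD _ _ _ _ C hC (hwidth (R - 2) (by omega))]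
        -- RHS components
        have hc0t : c0.tail.length = R - 1 := by simp [h1]
        have hself : (c0.tail ++ [((rows.getD (R - 1) []) ++ [c1.getLastD 0]).headD 0]).getD (R - 1) 0
            = ((rows.getD (R - 1) []) ++ [c1.getLastD 0]).headD 0 := by
          rw [← hc0t, pvAppendD_self]
        rw [hself, pvSetD_self _ (R - 1) _ [] (by simp [h2]; omega),
          pvConsD _ _ _ (R - 1) (by omega), pvDropLastD c1 _ _ (by omega)]
        rw [pvHeadD_cons_tail _ _ (by simp), pvGetLastD c1 0 (by omega), h3]
        have : R - 1 - 1 = R - 2 := by omega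
        rw [this]
      · rw [if_neg h0, if_neg hL]
        rw [pvSlice_one_neg_one, hgrow (i + 1) (by omega), hgrow i hi, hgrow (i - 1) (by omega)]
        rw [pvRowZero, pvRowTail, List.dropLast_concat,
          pvRowLastD _ _ _ _ C hC (hwidth (i - 1) (by omega))]
        -- RHS components
        rw [pvAppendD_lt _ _ _ i (by simp [h1]; omega), pvTailD,
          pvSetD_ne _ (R - 1) i _ [] (by omega), pvSetD_ne _ 0 i _ [] (by omega),
          pvConsD _ _ _ i (by omega), pvDropLastD c1 _ _ (by omega)]

lemma pvFold (R C : Nat) (hR : 2 ≤ R) (hC : 2 ≤ C) (ops : List String) :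
    ∀ st, pvInv R C st →
      pvInv R C (ops.foldl (fun s op => if PySem.Str.isIn "S" op then solutionShift s else solutionRot R s) st) ∧
      ops.foldl (fun g op => if PySem.Str.isIn "S" op then PySem.List.pyGetD g (-1) [] :: PySem.List.slice g none (some (-1)) else solutionAltRot g) (pvGlue R st)
        = pvGlue R (ops.foldl (fun s op => if PySem.Str.isIn "S" op then solutionShift s else solutionRot R s) st) := by
  induction ops with
  | nil => exact fun st h => ⟨h, rfl⟩
  | cons op ops ih =>
    intro st h
    simp only [List.foldl_cons]
    by_cases hs : PySem.Str.isIn "S" op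
    · rw [if_pos hs, if_pos hs, pvShift_glue R C st h (by omega)]
      exact ih _ (pvShift_inv R C st h (by omega))
    · rw [if_neg hs, if_neg hs, pvRot_glue R C st h hR hC]
      exact ih _ (pvRot_inv R C st h hR hC)

lemma pvMapD {α β : Type} (f : α → β) (x : List α) (d : β) (e : α) (i : Nat)
    (h : i < x.length) : (x.map f).getD i d = f (x.getD i e) := by
  rw [List.getD_eq_getElem _ _ (by simpa using h), List.getD_eq_getElem _ _ h, List.getElem_map]

lemma pvRowRecon (row : List Int) (C : Nat) (hlen : row.length = C) (hC : 2 ≤ C) :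
    (row.getD 0 0 :: row.tail.dropLast) ++ [row.getD (C - 1) 0] = row := by
  cases row with
  | nil => simp at hlen; omega
  | cons a l =>
    have hl : l ≠ [] := by intro e; rw [e] at hlen; simp at hlen; omega
    have hll : 0 < l.length := List.length_pos_iff.mpr hl
    rw [List.getD_cons_zero, List.tail_cons, pvConsD _ _ _ (C - 1) (by omega)]
    have hidx : C - 1 - 1 = l.length - 1 := by simp at hlen; omega
    rw [hidx, ← pvGetLastD l 0 hll, List.cons_append, pvDropLast_lastD l 0 hl]

lemma pvInit_inv (rc : List (List Int)) (hR : 2 ≤ rc.length)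
    (hC : 2 ≤ (rc.headD []).length)
    (hrect : ∀ row ∈ rc, row.length = (rc.headD []).length) :
    pvInv rc.length (rc.headD []).length
      ((List.range rc.length).map (fun r => (rc.getD r []).getD 0 0),
       rc.map (fun row => PySem.List.slice row (some 1) (some (-1))),
       (List.range rc.length).map (fun r => (rc.getD r []).getD ((rc.headD []).length - 1) 0)) := by
  refine ⟨by simp, by simp, by simp, ?_⟩
  intro l hl
  simp only [List.mem_map] at hl
  obtain ⟨row, hrow, he⟩ := hl
  rw [← he, pvSlice_one_neg_one, List.length_dropLast, List.length_tail, hrect row hrow]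
  omega

lemma pvInit_glue (rc : List (List Int)) (hR : 2 ≤ rc.length)
    (hC : 2 ≤ (rc.headD []).length)
    (hrect : ∀ row ∈ rc, row.length = (rc.headD []).length) :
    pvGlue rc.length
      ((List.range rc.length).map (fun r => (rc.getD r []).getD 0 0),
       rc.map (fun row => PySem.List.slice row (some 1) (some (-1))),
       (List.range rc.length).map (fun r => (rc.getD r []).getD ((rc.headD []).length - 1) 0)) = rc := by
  apply pvExtD ([] : List Int)
  · rw [pvGlue_length]
  · intro i hi
    rw [pvGlue_length] at hi
    rw [pvGlue_getD _ _ i hi]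
    simp only
    rw [PySem.List.getD_map_range _ _ _ _ hi, PySem.List.getD_map_range _ _ _ _ hi,
      pvMapD _ rc [] [] i hi, pvSlice_one_neg_one]
    exact pvRowRecon (rc.getD i []) _ (hrect _ (pvGetD_mem rc [] i hi)) hC

theorem solution_spec : Claim_equal_solution := by
  intro rc ops _ hpre
  obtain ⟨hR, hC, hrect⟩ := hpre
  obtain ⟨hinvF, hfold⟩ := pvFold rc.length (rc.headD []).length hR hC ops
    ((List.range rc.length).map (fun r => (rc.getD r []).getD 0 0),
     rc.map (fun row => PySem.List.slice row (some 1) (some (-1))),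
     (List.range rc.length).map (fun r => (rc.getD r []).getD ((rc.headD []).length - 1) 0))
    (pvInit_inv rc hR hC hrect)
  show solution rc ops = solution_alt rc ops
  calc solution rc ops
      = pvGlue rc.length (ops.foldl
          (fun s op => if PySem.Str.isIn "S" op then solutionShift s else solutionRot rc.length s)
          ((List.range rc.length).map (fun r => (rc.getD r []).getD 0 0),
           rc.map (fun row => PySem.List.slice row (some 1) (some (-1))),
           (List.range rc.length).map (fun r => (rc.getD r []).getD ((rc.headD []).length - 1) 0))) := rfl
    _ = ops.foldl
          (fun g op => if PySem.Str.isIn "S" op then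
            PySem.List.pyGetD g (-1) [] :: PySem.List.slice g none (some (-1))
            else solutionAltRot g)
          (pvGlue rc.length
            ((List.range rc.length).map (fun r => (rc.getD r []).getD 0 0),
             rc.map (fun row => PySem.List.slice row (some 1) (some (-1))),
             (List.range rc.length).map (fun r => (rc.getD r []).getD ((rc.headD []).length - 1) 0))) := hfold.symm
    _ = ops.foldl
          (fun g op => if PySem.Str.isIn "S" op then
            PySem.List.pyGetD g (-1) [] :: PySem.List.slice g none (some (-1))
            else solutionAltRot g) rc := by rw [pvInit_glue rc hR hC hrect]
    _ = solution_alt rc ops := rfl
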